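-- pv_equiv track=rewrite | github.com/E3SM-Project/zppy-interfaces | zppy_interfaces/pcmdi_diags/pcmdi_zppy_util.py | get_highlight_models
-- ===== SOURCE A (Python) =====
-- def get_highlight_models(all_models, model_name):
--     """
--     Prioritize models containing 'e3sm' and then any additional specified models.
--
--     Parameters:
--         data_dict (dict): Dictionary with a 'model' key containing a list of model names.
--         model_name (list): List of models to also highlight (after e3sm models).
--
--     Returns:
--         list: Ordered list of unique models to highlight.
--     """
--     highlight_model1 = []
--
--     # First, collect all models that contain "e3sm" (case-insensitive)
--     e3sm_models = [m for m in all_models if "e3sm" in m.lower()]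
--
--     # Then collect models in model_name that are not already in e3sm_models
--     additional_models = [
--         m for m in all_models if m in model_name and m not in e3sm_models
--     ]
--
--     # Combine both lists
--     highlight_model1 = e3sm_models + additional_models
--
--     return highlight_model1
-- ===== SOURCE B (Python) =====
-- def get_highlight_models(all_models, model_name):
--     """Single pass over all_models classifying each model into the e3sm
--     group or the additional-highlight group, then concatenate."""
--     e3sm = []
--     additional = []
--     for m in all_models:
--         if "e3sm" in m.lower():
--             e3sm.append(m)
--         elif m in model_name:
--             additional.append(m)
--     return e3sm + additional
-- ===== Notes on version B (the rewrite author's own statement) =====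
-- stated objective: simpler
-- what changed: Replaces A's two filtering scans (the second re-scanning the first's result list for the cross-group dedup) with one classifying pass keeping two accumulators; the elif subsumes 'm not in e3sm_models' because a model is in that list exactly when it contains 'e3sm'.
import Mathlib
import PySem

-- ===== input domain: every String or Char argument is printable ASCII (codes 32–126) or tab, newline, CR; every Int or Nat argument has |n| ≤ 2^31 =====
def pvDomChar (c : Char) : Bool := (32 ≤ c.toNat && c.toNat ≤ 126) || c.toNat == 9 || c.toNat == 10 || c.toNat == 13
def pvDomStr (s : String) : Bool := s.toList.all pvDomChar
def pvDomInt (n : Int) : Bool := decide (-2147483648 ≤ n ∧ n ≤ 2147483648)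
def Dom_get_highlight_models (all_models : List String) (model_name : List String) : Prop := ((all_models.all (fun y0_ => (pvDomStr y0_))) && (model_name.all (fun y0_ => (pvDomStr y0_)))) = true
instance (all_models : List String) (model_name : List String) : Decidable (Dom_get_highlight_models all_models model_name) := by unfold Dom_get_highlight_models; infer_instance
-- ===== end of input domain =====

-- B replaces A's two filtering scans with one classifying pass over all_models
-- keeping two accumulator lists (objective: simpler decomposition, same result).


-- ===== PORT A =====
-- "e3sm" in m.lower()
def pvIsE3sm (m : String) : Bool := PySem.Str.isIn "e3sm" (PySem.Str.lower m)

def get_highlight_models (all_models : List String) (model_name : List String) : List String :=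
  let e3sm_models := all_models.filter (fun m => pvIsE3sm m)
  let additional_models :=
    all_models.filter (fun m => model_name.contains m && !e3sm_models.contains m)
  e3sm_models ++ additional_models

-- ===== PORT B =====
def get_highlight_models_alt (all_models : List String) (model_name : List String) : List String :=
  let p := all_models.foldl
    (fun (acc : List String × List String) m =>
      if pvIsE3sm m then (acc.1 ++ [m], acc.2)
      else if model_name.contains m then (acc.1, acc.2 ++ [m])
      else acc)
    ([], [])
  p.1 ++ p.2

-- ===== PRECONDITION & SPEC =====
def Spec_get_highlight_models (all_models : List String) (model_name : List String) (out : List String) : Prop := out = get_highlight_models_alt all_models model_name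
instance (all_models : List String) (model_name : List String) (out : List String) : Decidable (Spec_get_highlight_models all_models model_name out) := by unfold Spec_get_highlight_models; infer_instance

-- ===== CLAIM (what is proved, stated in full; the proofs are below) =====
def Claim_equal_get_highlight_models : Prop := ∀ (all_models : List String) (model_name : List String), Dom_get_highlight_models all_models model_name → Spec_get_highlight_models all_models model_name (get_highlight_models all_models model_name)

-- ===== LEMMAS AND PROOFS =====
theorem pv_loop_inv (p q : String → Bool) (xs : List String) (a b : List String) :
    xs.foldl
      (fun (acc : List String × List String) m =>
        if p m then (acc.1 ++ [m], acc.2)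
        else if q m then (acc.1, acc.2 ++ [m])
        else acc)
      (a, b)
    = (a ++ xs.filter p, b ++ xs.filter (fun m => !p m && q m)) := by
  induction xs generalizing a b with
  | nil => simp
  | cons x xs ih =>
    cases hp : p x
    · cases hq : q x
      · simp [hp, hq, ih]
      · simp [hp, hq, ih]
    · simp [hp, ih]

theorem pv_contains_e3sm (all_models : List String) (m : String) (hm : m ∈ all_models) :
    (all_models.filter (fun m => pvIsE3sm m)).contains m = pvIsE3sm m := by
  by_cases h : pvIsE3sm m
  · simp [List.mem_filter, hm, h]
  · simp only [Bool.not_eq_true] at h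
    simp [List.mem_filter, h]

-- ===== VERDICT (by name: the statement is the Claim_ definition above) =====
theorem get_highlight_models_spec : Claim_equal_get_highlight_models := by
  intro all_models model_name _
  unfold Spec_get_highlight_models get_highlight_models get_highlight_models_alt
  rw [pv_loop_inv (fun m => pvIsE3sm m) (fun m => model_name.contains m)]
  simp only [List.nil_append]
  congr 1
  refine List.filter_congr (fun m hm => ?_)
  rw [pv_contains_e3sm all_models m hm, Bool.and_comm]
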